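-- pv_equiv track=rewrite | github.com/brownvc/neural-fields-review | main.py | extract_comma_seperated_field
-- ===== SOURCE A (Python) =====
-- def extract_comma_seperated_field(v, key):
--     value = v.get(key, "")
--     if "Keywords" in key:
--         #keywords may be in form '(apple, banana)', so we don't simply split by ',' here
--         result = []
--         seenOpenParentheses = False
--         tmpStr = ""
--         for char in value:
--             if char == "(":
--                 seenOpenParentheses = True
--                 tmpStr += "("
--             elif char == "," and seenOpenParentheses == False:
--                 result.append(tmpStr.strip())
--                 tmpStr = ""
--             elif char == ")":
--                 seenOpenParentheses = False
--                 tmpStr += ")"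
--             else:
--                 tmpStr += char
--         if tmpStr:
--             result.append(tmpStr.strip())
--         return result
--     else:
--         if len(value) > 0:
--             result = value.split(",")
--             for i in range(len(result)):
--                 result[i] = result[i].strip()
--         else:
--             result = []
--     return result
-- ===== SOURCE B (Python) =====
-- def _paren_state(state, tok):
--     # state after scanning tok: last '(' or ')' decides; no paren keeps state
--     for ch in reversed(tok):
--         if ch == "(":
--             return True
--         if ch == ")":
--             return False
--     return state
--
-- def extract_comma_seperated_field(v, key):
--     value = v.get(key, "")
--     if "Keywords" in key:
--         tokens = value.split(",")
--         segments = []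
--         cur = tokens[0]
--         inside = _paren_state(False, tokens[0])
--         for tok in tokens[1:]:
--             if inside:
--                 cur += "," + tok
--             else:
--                 segments.append(cur.strip())
--                 cur = tok
--             inside = _paren_state(inside, tok)
--         if cur:
--             segments.append(cur.strip())
--         return segments
--     return [s.strip() for s in value.split(",")] if value else []
-- ===== Notes on version B (the rewrite author's own statement) =====
-- stated objective: alternative
-- what changed: Replaces A's character-by-character state-machine accumulator with a split-on-comma pass that re-merges adjacent tokens using a parenthesis state carried across tokens (last paren of each token decides the state).
import Mathlib
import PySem

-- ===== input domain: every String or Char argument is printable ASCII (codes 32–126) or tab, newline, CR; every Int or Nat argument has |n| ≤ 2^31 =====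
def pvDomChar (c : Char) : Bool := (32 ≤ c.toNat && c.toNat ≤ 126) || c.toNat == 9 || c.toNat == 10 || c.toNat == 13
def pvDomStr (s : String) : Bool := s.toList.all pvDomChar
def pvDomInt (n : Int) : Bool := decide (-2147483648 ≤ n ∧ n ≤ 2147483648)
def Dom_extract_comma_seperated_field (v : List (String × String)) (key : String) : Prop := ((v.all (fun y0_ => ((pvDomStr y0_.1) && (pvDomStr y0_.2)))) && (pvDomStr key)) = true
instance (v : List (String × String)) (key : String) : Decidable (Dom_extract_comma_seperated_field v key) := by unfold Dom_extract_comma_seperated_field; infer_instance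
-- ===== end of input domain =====

-- B replaces A's char-level state machine with split-on-comma plus token re-merging (alternative decomposition, same cost).


-- ===== PORT A =====
-- A's per-character loop body: state = (result, seenOpenParentheses, tmpStr)
def pvStepA (s : List String × Bool × List Char) (char : Char) : List String × Bool × List Char :=
  if char = '(' then (s.1, true, s.2.2 ++ ['('])
  else if char = ',' ∧ s.2.1 = false then (s.1 ++ [String.ofList (PySem.Chars.strip s.2.2)], s.2.1, [])
  else if char = ')' then (s.1, false, s.2.2 ++ [')'])
  else (s.1, s.2.1, s.2.2 ++ [char])

def extract_comma_seperated_field (v : List (String × String)) (key : String) : List String :=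
  let value := PySem.Dict.getD (PySem.Dict.mk v) key ""
  if PySem.Str.isIn "Keywords" key then
    let st := value.toList.foldl pvStepA ([], false, [])
    if st.2.2 ≠ [] then st.1 ++ [String.ofList (PySem.Chars.strip st.2.2)] else st.1
  else
    if 0 < PySem.Str.len value then
      (PySem.Chars.splitOn value.toList [',']).map (fun s => String.ofList (PySem.Chars.strip s))
    else []

-- ===== PORT B =====
-- _paren_state: scan the token from the right, first paren seen decides
def pvParenState (state : Bool) : List Char → Bool
  | [] => state
  | c :: rest => if c = '(' then true else if c = ')' then false else pvParenState state rest

-- B's per-token loop body: state = (segments, cur, inside)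
def pvStepB (s : List String × List Char × Bool) (tok : List Char) : List String × List Char × Bool :=
  if s.2.2 = true then (s.1, s.2.1 ++ ',' :: tok, pvParenState s.2.2 tok.reverse)
  else (s.1 ++ [String.ofList (PySem.Chars.strip s.2.1)], tok, pvParenState s.2.2 tok.reverse)

def extract_comma_seperated_field_alt (v : List (String × String)) (key : String) : List String :=
  let value := PySem.Dict.getD (PySem.Dict.mk v) key ""
  if PySem.Str.isIn "Keywords" key then
    match PySem.Chars.splitOn value.toList [','] with
    | [] => []  -- unreachable: split never returns an empty list
    | t0 :: rest =>
      let st := rest.foldl pvStepB ([], t0, pvParenState false t0.reverse)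
      if st.2.1 ≠ [] then st.1 ++ [String.ofList (PySem.Chars.strip st.2.1)] else st.1
  else
    if 0 < PySem.Str.len value then
      (PySem.Chars.splitOn value.toList [',']).map (fun s => String.ofList (PySem.Chars.strip s))
    else []

-- ===== PRECONDITION & SPEC =====
def Spec_extract_comma_seperated_field (v : List (String × String)) (key : String) (out : List String) : Prop := out = extract_comma_seperated_field_alt v key
instance (v : List (String × String)) (key : String) (out : List String) : Decidable (Spec_extract_comma_seperated_field v key out) := by unfold Spec_extract_comma_seperated_field; infer_instance

-- ===== CLAIM (what is proved, stated in full; the proofs are below) =====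
def Claim_equal_extract_comma_seperated_field : Prop := ∀ (v : List (String × String)) (key : String), Dom_extract_comma_seperated_field v key → Spec_extract_comma_seperated_field v key (extract_comma_seperated_field v key)

-- ===== LEMMAS AND PROOFS =====

-- structural single-comma split: (first piece, remaining pieces)
def pvSplit1 : List Char → List Char × List (List Char)
  | [] => ([], [])
  | c :: rest =>
    let p := pvSplit1 rest
    if c = ',' then ([], p.1 :: p.2) else (c :: p.1, p.2)

lemma pvParenState_append (xs ys : List Char) (s : Bool) :
    pvParenState s (xs ++ ys) = pvParenState (pvParenState s ys) xs := by
  induction xs with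
  | nil => rfl
  | cons c t ih => simp [pvParenState, ih]

lemma pvSplitOn_go_comma : ∀ (fuel : Nat) (l cur : List Char) (acc : List (List Char)),
    l.length < fuel →
    PySem.Chars.splitOn.go [','] fuel l cur acc =
      acc.reverse ++ ((cur.reverse ++ (pvSplit1 l).1) :: (pvSplit1 l).2) := by
  intro fuel
  induction fuel with
  | zero => intro l cur acc h; omega
  | succ n ih =>
    intro l cur acc h
    cases l with
    | nil => simp [PySem.Chars.splitOn.go, pvSplit1]
    | cons c rest =>
      simp only [List.length_cons] at h
      by_cases hc : c = ','
      · subst hc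
        simp only [PySem.Chars.splitOn.go, pvSplit1]
        rw [if_pos (by simp [List.isPrefixOf])]
        rw [show List.drop [','].length (',' :: rest) = rest from rfl]
        rw [ih _ _ _ (by omega)]
        simp
      · simp only [PySem.Chars.splitOn.go, pvSplit1]
        rw [if_neg (by simp [List.isPrefixOf]; exact fun h2 => hc h2.symm)]
        rw [ih _ _ _ (by omega)]
        simp [hc]

lemma pvSplitOn_comma (l : List Char) :
    PySem.Chars.splitOn l [','] = (pvSplit1 l).1 :: (pvSplit1 l).2 := by
  have := pvSplitOn_go_comma (l.length + 1) l [] [] (by omega)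
  simpa [PySem.Chars.splitOn] using this

lemma pvFoldA_eq (l : List Char) : ∀ (res : List String) (seen : Bool) (tmp : List Char),
    l.foldl pvStepA (res, seen, tmp) =
      (((pvSplit1 l).2.foldl pvStepB
          (res, tmp ++ (pvSplit1 l).1, pvParenState seen (pvSplit1 l).1.reverse)).1,
       ((pvSplit1 l).2.foldl pvStepB
          (res, tmp ++ (pvSplit1 l).1, pvParenState seen (pvSplit1 l).1.reverse)).2.2,
       ((pvSplit1 l).2.foldl pvStepB
          (res, tmp ++ (pvSplit1 l).1, pvParenState seen (pvSplit1 l).1.reverse)).2.1) := by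
  induction l with
  | nil => intro res seen tmp; simp [pvSplit1, pvParenState]
  | cons c rest ih =>
    intro res seen tmp
    by_cases hc : c = ','
    · subst hc
      cases hs : seen with
      | false =>
        rw [List.foldl_cons,
          show pvStepA (res, false, tmp) ',' =
            (res ++ [String.ofList (PySem.Chars.strip tmp)], false, []) from by simp [pvStepA],
          ih]
        simp [pvSplit1, pvStepB, pvParenState, List.foldl_cons]
      | true =>
        rw [List.foldl_cons,
          show pvStepA (res, true, tmp) ',' = (res, true, tmp ++ [',']) from by simp [pvStepA],
          ih]
        simp [pvSplit1, pvStepB, pvParenState, List.foldl_cons]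
    · have hsplit : pvSplit1 (c :: rest) = (c :: (pvSplit1 rest).1, (pvSplit1 rest).2) := by
        simp [pvSplit1, hc]
      rw [hsplit]
      by_cases h1 : c = '('
      · subst h1
        rw [List.foldl_cons,
          show pvStepA (res, seen, tmp) '(' = (res, true, tmp ++ ['(']) from by simp [pvStepA],
          ih, List.reverse_cons, pvParenState_append]
        simp [pvParenState]
      · by_cases h2 : c = ')'
        · subst h2
          rw [List.foldl_cons,
            show pvStepA (res, seen, tmp) ')' = (res, false, tmp ++ [')']) from by
              simp [pvStepA],
            ih, List.reverse_cons, pvParenState_append]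
          simp [pvParenState]
        · rw [List.foldl_cons,
            show pvStepA (res, seen, tmp) c = (res, seen, tmp ++ [c]) from by
              simp [pvStepA, hc, h1, h2],
            ih, List.reverse_cons, pvParenState_append]
          simp [pvParenState, h1, h2]

-- ===== VERDICT (by name: the statement is the Claim_ definition above) =====
theorem extract_comma_seperated_field_spec : Claim_equal_extract_comma_seperated_field := by
  intro v key _
  unfold Spec_extract_comma_seperated_field
  unfold extract_comma_seperated_field extract_comma_seperated_field_alt
  by_cases hk : PySem.Str.isIn "Keywords" key = true
  · simp only [hk, if_true]
    rw [pvSplitOn_comma, pvFoldA_eq]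
    simp
  · simp only [hk, if_false, Bool.false_eq_true]
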